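-- pv_equiv track=rewrite | github.com/Elly-na/chatbot | app.py | normalize_typos
-- ===== SOURCE A (Python) =====
-- def normalize_typos(text):
--     """Normalize common typos"""
--     replacements = {
--         'shwo': 'show',
--         'confi': 'configure',
--         'cofig': 'config',
--         'interf': 'interface',
--         'hosname': 'hostname',
--         'runing': 'running',
--         'runnig': 'running',
--         'shutdwon': 'shutdown',
--         'shutdonw': 'shutdown'
--     }
--
--     for typo, correct in replacements.items():
--         text = text.replace(typo, correct)
--
--     return text
-- ===== SOURCE B (Python) =====
-- def normalize_typos(text):
--     """Normalize common typos"""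
--     replacements = (
--         ('shwo', 'show'),
--         ('confi', 'configure'),
--         ('cofig', 'config'),
--         ('interf', 'interface'),
--         ('hosname', 'hostname'),
--         ('runing', 'running'),
--         ('runnig', 'running'),
--         ('shutdwon', 'shutdown'),
--         ('shutdonw', 'shutdown'),
--     )
--     out = []
--     i = 0
--     n = len(text)
--     while i < n:
--         for typo, correct in replacements:
--             if text.startswith(typo, i):
--                 out.append(correct)
--                 i += len(typo)
--                 break
--         else:
--             out.append(text[i])
--             i += 1
--     return ''.join(out)
-- ===== Notes on version B (the rewrite author's own statement) =====
-- stated objective: alternative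
-- what changed: B makes a single left-to-right scan over the text, trying the typos in dict order at each position and emitting the correction (skipping over it) or the current character, instead of A's nine sequential full-text str.replace passes; equivalence rests on the typos/corrections being overlap-free.
import Mathlib
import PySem

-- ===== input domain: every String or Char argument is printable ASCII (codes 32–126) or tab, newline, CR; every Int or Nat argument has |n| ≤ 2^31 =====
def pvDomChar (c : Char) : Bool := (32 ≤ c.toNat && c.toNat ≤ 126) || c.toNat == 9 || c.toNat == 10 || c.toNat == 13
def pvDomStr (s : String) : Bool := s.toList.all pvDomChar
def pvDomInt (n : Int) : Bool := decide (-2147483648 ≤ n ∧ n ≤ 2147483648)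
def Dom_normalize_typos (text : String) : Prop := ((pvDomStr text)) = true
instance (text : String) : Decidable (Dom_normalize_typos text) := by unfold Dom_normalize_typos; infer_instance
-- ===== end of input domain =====

-- B replaces A's nine sequential full-text `replace` passes by ONE left-to-right scan that tries the
-- typos in dict order at each position (objective: alternative algorithm — one pass instead of nine).

-- ===== PORT A =====
-- literal transliteration: nine sequential str.replace passes in dict order
def normalize_typos (text : String) : String :=
  let text := PySem.Str.replace text "shwo" "show"
  let text := PySem.Str.replace text "confi" "configure"
  let text := PySem.Str.replace text "cofig" "config"
  let text := PySem.Str.replace text "interf" "interface"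
  let text := PySem.Str.replace text "hosname" "hostname"
  let text := PySem.Str.replace text "runing" "running"
  let text := PySem.Str.replace text "runnig" "running"
  let text := PySem.Str.replace text "shutdwon" "shutdown"
  let text := PySem.Str.replace text "shutdonw" "shutdown"
  text

-- ===== PORT B =====
-- the replacements tuple of Source B
def ntTypos : List (List Char × List Char) :=
  [("shwo".toList, "show".toList),
   ("confi".toList, "configure".toList),
   ("cofig".toList, "config".toList),
   ("interf".toList, "interface".toList),
   ("hosname".toList, "hostname".toList),
   ("runing".toList, "running".toList),
   ("runnig".toList, "running".toList),
   ("shutdwon".toList, "shutdown".toList),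
   ("shutdonw".toList, "shutdown".toList)]

-- Source B's while loop: at position i try each typo in order; on a match emit the correction and skip
-- the typo, else emit the current character.  fuel = n - i (the loop runs at most that often).
def ntScan (L : List (List Char × List Char)) : Nat → List Char → List Char
  | _, [] => []
  | 0, _ :: _ => []
  | fuel + 1, c :: t =>
    match L.find? (fun q => q.1.isPrefixOf (c :: t)) with
    | some q => q.2 ++ ntScan L fuel ((c :: t).drop q.1.length)
    | none => c :: ntScan L fuel t

def normalize_typos_alt (text : String) : String :=
  String.ofList (ntScan ntTypos text.toList.length text.toList)

-- ===== PRECONDITION & SPEC =====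
def Spec_normalize_typos (text : String) (out : String) : Prop := out = normalize_typos_alt text
instance (text : String) (out : String) : Decidable (Spec_normalize_typos text out) := by unfold Spec_normalize_typos; infer_instance

-- ===== CLAIM (what is proved, stated in full; the proofs are below) =====
def Claim_equal_normalize_typos : Prop := ∀ (text : String), Dom_normalize_typos text → Spec_normalize_typos text (normalize_typos text)

-- ===== LEMMAS AND PROOFS =====

-- `ntRep o os new` is one full replace pass with pattern (o :: os) (nonempty by construction).
def ntRep (o : Char) (os new : List Char) : List Char → List Char
  | [] => []
  | c :: t =>
    if (o :: os).isPrefixOf (c :: t) then new ++ ntRep o os new (t.drop os.length)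
    else c :: ntRep o os new t
termination_by l => l.length
decreasing_by
  · simp only [List.length_drop, List.length_cons]; omega
  · simp only [List.length_cons]; omega

lemma ntRep_nil (o : Char) (os new : List Char) : ntRep o os new [] = [] := by
  simp [ntRep]

lemma ntRep_match (o : Char) (os new l : List Char) (h : (o :: os) <+: l) :
    ntRep o os new l = new ++ ntRep o os new (l.drop (os.length + 1)) := by
  cases l with
  | nil => exact absurd (List.prefix_nil.mp h) (by simp)
  | cons c t =>
    rw [ntRep, if_pos (List.isPrefixOf_iff_prefix.mpr h)]
    simp

lemma ntRep_nomatch (o : Char) (os new : List Char) (c : Char) (t : List Char)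
    (h : ¬ (o :: os) <+: (c :: t)) :
    ntRep o os new (c :: t) = c :: ntRep o os new t := by
  rw [ntRep, if_neg (by simpa [List.isPrefixOf_iff_prefix] using h)]

-- PySem.Chars.replace (nonempty pattern) is exactly ntRep
lemma ntGo_acc (old new : List Char) :
    ∀ fuel l acc, PySem.Chars.replace.go old new fuel l acc
      = acc.reverse ++ PySem.Chars.replace.go old new fuel l [] := by
  intro fuel
  induction fuel with
  | zero => intro l acc; simp [PySem.Chars.replace.go]
  | succ f ih =>
    intro l acc
    cases l with
    | nil => simp [PySem.Chars.replace.go]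
    | cons c t =>
      simp only [PySem.Chars.replace.go]
      by_cases h : old.isPrefixOf (c :: t)
      · rw [if_pos h, if_pos h, ih _ (new.reverse ++ acc), ih _ (new.reverse ++ [])]
        simp
      · rw [if_neg h, if_neg h, ih _ (c :: acc), ih _ (c :: [])]
        simp

lemma ntGo_eq_rep (o : Char) (os new : List Char) :
    ∀ fuel l, l.length ≤ fuel →
      PySem.Chars.replace.go (o :: os) new fuel l [] = ntRep o os new l := by
  intro fuel
  induction fuel with
  | zero =>
    intro l hl
    have : l = [] := List.length_eq_zero_iff.mp (Nat.le_zero.mp hl)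
    subst this
    simp [PySem.Chars.replace.go, ntRep_nil]
  | succ f ih =>
    intro l hl
    cases l with
    | nil => simp [PySem.Chars.replace.go, ntRep_nil]
    | cons c t =>
      simp only [PySem.Chars.replace.go]
      by_cases h : (o :: os).isPrefixOf (c :: t)
      · rw [if_pos h, ntGo_acc, ih, ntRep, if_pos h]
        · simp
        · simp only [List.length_drop, List.length_cons]
          simp only [List.length_cons] at hl
          omega
      · rw [if_neg h, ntGo_acc, ih t (by simp only [List.length_cons] at hl; omega),
          ntRep, if_neg h]
        simp

lemma ntReplace_eq_rep (o : Char) (os new s : List Char) :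
    PySem.Chars.replace s (o :: os) new = ntRep o os new s := by
  rw [PySem.Chars.replace, if_neg (by simp)]
  exact ntGo_eq_rep o os new s.length s le_rfl

-- scanner with full fuel
def ntScanP (L : List (List Char × List Char)) (s : List Char) : List Char :=
  ntScan L s.length s

lemma ntScan_irrel (L : List (List Char × List Char)) (hne : ∀ q ∈ L, q.1 ≠ []) :
    ∀ f1 f2 s, s.length ≤ f1 → s.length ≤ f2 → ntScan L f1 s = ntScan L f2 s := by
  intro f1
  induction f1 with
  | zero =>
    intro f2 s h1 _
    have : s = [] := List.length_eq_zero_iff.mp (Nat.le_zero.mp h1)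
    subst this
    cases f2 <;> simp [ntScan]
  | succ f ih =>
    intro f2 s h1 h2
    cases s with
    | nil => cases f2 <;> simp [ntScan]
    | cons c t =>
      cases f2 with
      | zero => simp only [List.length_cons] at h2; omega
      | succ f2' =>
        simp only [ntScan]
        cases hf : L.find? (fun q => q.1.isPrefixOf (c :: t)) with
        | none =>
          simp only [List.length_cons] at h1 h2
          show c :: ntScan L f t = c :: ntScan L f2' t
          rw [ih f2' t (by omega) (by omega)]
        | some q =>
          have hq : q.1 <+: (c :: t) :=
            List.isPrefixOf_iff_prefix.mp (by simpa using List.find?_some hf)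
          have hql : q.1.length ≤ t.length + 1 := by
            simpa using hq.length_le
          have hq0 : q.1 ≠ [] := hne q (List.mem_of_find?_eq_some hf)
          have hq1 : 1 ≤ q.1.length := by
            cases hq1 : q.1 with
            | nil => exact absurd hq1 hq0
            | cons a b => simp
          simp only [List.length_cons] at h1 h2
          show q.2 ++ ntScan L f ((c :: t).drop q.1.length) = q.2 ++ ntScan L f2' ((c :: t).drop q.1.length)
          rw [ih f2' ((c :: t).drop q.1.length) (by simp; omega) (by simp; omega)]

lemma ntScanP_nil (L : List (List Char × List Char)) : ntScanP L [] = [] := by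
  simp [ntScanP, ntScan]

lemma ntScanP_cons_none (L : List (List Char × List Char)) (c : Char) (t : List Char)
    (h : L.find? (fun q => q.1.isPrefixOf (c :: t)) = none) :
    ntScanP L (c :: t) = c :: ntScanP L t := by
  simp [ntScanP, ntScan, h]

lemma ntScanP_cons_some (L : List (List Char × List Char)) (hne : ∀ q ∈ L, q.1 ≠ [])
    (c : Char) (t : List Char) (q : List Char × List Char)
    (h : L.find? (fun q => q.1.isPrefixOf (c :: t)) = some q) :
    ntScanP L (c :: t) = q.2 ++ ntScanP L ((c :: t).drop q.1.length) := by
  have hq : q.1 <+: (c :: t) :=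
    List.isPrefixOf_iff_prefix.mp (by simpa using List.find?_some h)
  have hql : q.1.length ≤ t.length + 1 := by simpa using hq.length_le
  have hq0 : q.1 ≠ [] := hne q (List.mem_of_find?_eq_some h)
  have hq1 : 1 ≤ q.1.length := by
    cases hq1 : q.1 with
    | nil => exact absurd hq1 hq0
    | cons a b => simp
  simp only [ntScanP, List.length_cons, ntScan, h]
  rw [ntScan_irrel L hne t.length ((c :: t).drop q.1.length).length _ (by simp; omega) le_rfl]

lemma ntScanP_empty (s : List Char) : ntScanP [] s = s := by
  induction s with
  | nil => exact ntScanP_nil []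
  | cons c t ih => rw [ntScanP_cons_none _ c t (by simp), ih]

-- pass-through: the scanner copies a block no pattern can start inside
lemma ntScanP_append (L : List (List Char × List Char)) :
    ∀ ys X, (∀ m, m < ys.length → ∀ q ∈ L, ¬(ys.drop m <+: q.1) ∧ ¬(q.1 <+: ys.drop m)) →
      ntScanP L (ys ++ X) = ys ++ ntScanP L X := by
  intro ys
  induction ys with
  | nil => intro X _; simp
  | cons y ys ih =>
    intro X h
    have hnone : L.find? (fun q => q.1.isPrefixOf (y :: (ys ++ X))) = none := by
      rw [List.find?_eq_none]
      intro q hq hpre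
      have hp : q.1 <+: ((y :: ys) ++ X) := by
        simpa [List.isPrefixOf_iff_prefix] using hpre
      have h0 := h 0 (by simp) q hq
      simp only [List.drop_zero] at h0
      rcases List.prefix_or_prefix_of_prefix hp (List.prefix_append (y :: ys) X) with h' | h'
      · exact h0.2 h'
      · exact h0.1 h'
    rw [List.cons_append, ntScanP_cons_none L y (ys ++ X) hnone,
      ih X (fun m hm q hq => h (m + 1) (by simpa using Nat.succ_lt_succ hm) q hq)]
    rfl

-- no occurrence of the pattern before position m ⇒ the pass leaves the first m characters alone
lemma ntRep_split (o : Char) (os new : List Char) :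
    ∀ m t, (∀ p, p < m → ¬ (o :: os) <+: t.drop p) →
      ntRep o os new t = t.take m ++ ntRep o os new (t.drop m) := by
  intro m
  induction m with
  | zero => intro t _; simp
  | succ m ih =>
    intro t h
    cases t with
    | nil => simp [ntRep_nil]
    | cons c t' =>
      have h0 : ¬ (o :: os) <+: (c :: t') := by simpa using h 0 (Nat.succ_pos m)
      rw [ntRep_nomatch o os new c t' h0, ih t' (fun p hp => by
        simpa using h (p + 1) (Nat.succ_lt_succ hp))]
      simp

lemma ntRep_take (o : Char) (os new : List Char) (m : Nat) (t : List Char)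
    (h : ∀ p, p < m → ¬ (o :: os) <+: t.drop p) :
    (ntRep o os new t).take m = t.take m := by
  rw [ntRep_split o os new m t h]
  by_cases hm : m ≤ t.length
  · rw [List.take_left' (by simp [hm])]
  · have hd : t.drop m = [] := List.drop_eq_nil_of_le (by omega)
    rw [hd, ntRep_nil, List.append_nil, List.take_take, min_self]

-- one pattern's pass does not create or destroy a front match of a compatible pattern
lemma ntMatchIff (o : Char) (os c : List Char) (a : List Char)
    (hCi : ∀ m, 1 ≤ m → m < a.length →
      ¬((o :: os) <+: a.drop m) ∧ ¬(a.drop m <+: (o :: os)) ∧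
      ¬(a.drop m <+: c) ∧ ¬(c <+: a.drop m))
    (x : Char) (t : List Char) :
    (a <+: (x :: ntRep o os c t)) ↔ (a <+: (x :: t)) := by
  cases ha : a with
  | nil => simp
  | cons a0 a' =>
    rw [← ha]
    have hal : a.length = a'.length + 1 := by rw [ha]; simp
    by_cases hE : ∃ p, p + 1 < a.length ∧ (o :: os) <+: t.drop p
    · -- an occurrence of the pattern starts strictly inside the window: both sides fail
      let p0 := Nat.find hE
      have hp0 : p0 + 1 < a.length ∧ (o :: os) <+: t.drop p0 := Nat.find_spec hE
      have hmin : ∀ q, q < p0 → ¬ (o :: os) <+: t.drop q := by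
        intro q hq hocc
        exact Nat.find_min hE hq ⟨by omega, hocc⟩
      have hC := hCi (p0 + 1) (by omega) hp0.1
      constructor
      · intro h
        exfalso
        -- a front match in the transformed text would overlap the inserted correction
        have hp0t : p0 < t.length := by
          by_contra hc
          have : t.drop p0 = [] := List.drop_eq_nil_of_le (by omega)
          rw [this] at hp0
          exact absurd (List.prefix_nil.mp hp0.2) (by simp)
        have hrep : ntRep o os c t = t.take p0 ++ (c ++ ntRep o os c ((t.drop p0).drop (os.length + 1))) := by
          rw [ntRep_split o os c p0 t hmin, ntRep_match o os c (t.drop p0) hp0.2]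
        have hcast : (x :: ntRep o os c t) = (x :: t.take p0) ++ (c ++ ntRep o os c ((t.drop p0).drop (os.length + 1))) := by
          rw [hrep]; simp
        have hdrop := h.drop (p0 + 1)
        have hlen : (x :: t.take p0).length = p0 + 1 := by simp; omega
        have hdl : ((x :: t.take p0) ++ (c ++ ntRep o os c ((t.drop p0).drop (os.length + 1)))).drop (p0 + 1)
            = c ++ ntRep o os c ((t.drop p0).drop (os.length + 1)) :=
          List.drop_left' hlen
        rw [hcast, hdl] at hdrop
        rcases List.prefix_or_prefix_of_prefix hdrop
          (List.prefix_append c (ntRep o os c ((t.drop p0).drop (os.length + 1)))) with h' | h'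
        · exact hC.2.2.1 h'
        · exact hC.2.2.2 h'
      · intro h
        exfalso
        have hdrop := h.drop (p0 + 1)
        have : (x :: t).drop (p0 + 1) = t.drop p0 := by simp
        rw [this] at hdrop
        rcases List.prefix_or_prefix_of_prefix hdrop hp0.2 with h' | h'
        · exact hC.2.1 h'
        · exact hC.1 h'
    · -- no occurrence inside the window: the pass keeps the window's characters
      have hE' : ∀ p, p + 1 < a.length → ¬ (o :: os) <+: t.drop p :=
        fun p hp hocc => hE ⟨p, hp, hocc⟩
      have htake : (ntRep o os c t).take a'.length = t.take a'.length := by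
        apply ntRep_take
        intro p hp
        exact hE' p (by omega)
      have htake2 : (x :: ntRep o os c t).take a.length = (x :: t).take a.length := by
        rw [hal]
        simp only [List.take_succ_cons]
        rw [htake]
      simp only [List.prefix_iff_eq_take]
      rw [htake2]

lemma ntFind?_congr {α : Type} (l : List α) (p q : α → Bool) (h : ∀ a ∈ l, p a = q a) :
    l.find? p = l.find? q := by
  induction l with
  | nil => rfl
  | cons a l ih =>
    simp only [List.find?_cons]
    rw [h a (by simp)]
    cases q a <;> simp [ih (fun b hb => h b (by simp [hb]))]

-- compatibility of one (pattern, correction) pair with a later pair q, checked by `decide`: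
-- no suffix of a later pattern overlaps this pattern or this correction, in either direction
def ntCompatB (old c : List Char) (q : List Char × List Char) : Bool :=
  !(q.1.isEmpty) &&
  (List.range q.1.length).all (fun m =>
    if m = 0 then true else
      !(old.isPrefixOf (q.1.drop m)) && !((q.1.drop m).isPrefixOf old) &&
      !((q.1.drop m).isPrefixOf c) && !(c.isPrefixOf (q.1.drop m))) &&
  (List.range c.length).all (fun m =>
    !((c.drop m).isPrefixOf q.1) && !(q.1.isPrefixOf (c.drop m)))

lemma ntCompat_ne (old c : List Char) (q : List Char × List Char)
    (h : ntCompatB old c q = true) : q.1 ≠ [] := by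
  simp only [ntCompatB, Bool.and_eq_true, Bool.not_eq_true', List.isEmpty_eq_false_iff] at h
  exact h.1.1

lemma ntCompat_i (old c : List Char) (q : List Char × List Char)
    (h : ntCompatB old c q = true) :
    ∀ m, 1 ≤ m → m < q.1.length →
      ¬(old <+: q.1.drop m) ∧ ¬(q.1.drop m <+: old) ∧
      ¬(q.1.drop m <+: c) ∧ ¬(c <+: q.1.drop m) := by
  intro m h1 h2
  simp only [ntCompatB, Bool.and_eq_true, List.all_eq_true, List.mem_range] at h
  have := h.1.2 m h2
  rw [if_neg (by omega)] at this
  simp only [Bool.and_eq_true, Bool.not_eq_true', ← Bool.not_eq_true] at this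
  simp only [List.isPrefixOf_iff_prefix] at this
  exact ⟨this.1.1.1, this.1.1.2, this.1.2, this.2⟩

lemma ntCompat_ii (old c : List Char) (q : List Char × List Char)
    (h : ntCompatB old c q = true) :
    ∀ m, m < c.length → ¬(c.drop m <+: q.1) ∧ ¬(q.1 <+: c.drop m) := by
  intro m hm
  simp only [ntCompatB, Bool.and_eq_true, List.all_eq_true, List.mem_range] at h
  have := h.2 m hm
  simp only [Bool.not_eq_true', ← Bool.not_eq_true] at this
  simp only [List.isPrefixOf_iff_prefix] at this
  exact this

-- MAIN STEP: prepending a compatible pair to the scanner's list = running that pair's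
-- replace pass first and scanning the result with the remaining pairs
lemma ntStep (o : Char) (os c : List Char) (L : List (List Char × List Char))
    (hC : ∀ q ∈ L, ntCompatB (o :: os) c q = true) :
    ∀ n s, s.length ≤ n →
      ntScanP L (ntRep o os c s) = ntScanP ((o :: os, c) :: L) s := by
  have hne : ∀ q ∈ L, q.1 ≠ [] := fun q hq => ntCompat_ne _ _ q (hC q hq)
  have hne' : ∀ q ∈ ((o :: os, c) :: L), q.1 ≠ [] := by
    intro q hq
    rcases List.mem_cons.mp hq with h | h
    · subst h; simp
    · exact hne q h
  intro n
  induction n with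
  | zero =>
    intro s hs
    have : s = [] := List.length_eq_zero_iff.mp (Nat.le_zero.mp hs)
    subst this
    rw [ntRep_nil, ntScanP_nil, ntScanP_nil]
  | succ n ih =>
    intro s hs
    cases s with
    | nil => rw [ntRep_nil, ntScanP_nil, ntScanP_nil]
    | cons x t =>
      simp only [List.length_cons] at hs
      by_cases hx : (o :: os) <+: (x :: t)
      · -- the new pair matches in front: both sides emit c and continue after it
        rw [ntRep_match o os c (x :: t) hx]
        have hfind : ((o :: os, c) :: L).find? (fun q => q.1.isPrefixOf (x :: t))
            = some (o :: os, c) :=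
          List.find?_cons_of_pos (by simpa [List.isPrefixOf_iff_prefix] using hx)
        rw [ntScanP_cons_some ((o :: os, c) :: L) hne' x t (o :: os, c) hfind]
        have happ : ntScanP L (c ++ ntRep o os c ((x :: t).drop (os.length + 1)))
            = c ++ ntScanP L (ntRep o os c ((x :: t).drop (os.length + 1))) := by
          apply ntScanP_append L
          intro m hm q hq
          exact ntCompat_ii (o :: os) c q (hC q hq) m hm
        rw [happ, ih ((x :: t).drop (os.length + 1)) (by simp; omega)]
        rfl
      · rw [ntRep_nomatch o os c x t hx]
        have hiff : ∀ q ∈ L, (fun q : List Char × List Char =>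
            q.1.isPrefixOf (x :: ntRep o os c t)) q = (fun q : List Char × List Char =>
            q.1.isPrefixOf (x :: t)) q := by
          intro q hq
          have := ntMatchIff o os c q.1 (ntCompat_i (o :: os) c q (hC q hq)) x t
          show q.1.isPrefixOf (x :: ntRep o os c t) = q.1.isPrefixOf (x :: t)
          rw [Bool.eq_iff_iff]
          simpa only [List.isPrefixOf_iff_prefix] using this
        have hfind := ntFind?_congr L _ _ hiff
        cases hf : L.find? (fun q => q.1.isPrefixOf (x :: t)) with
        | none =>
          rw [ntScanP_cons_none L x (ntRep o os c t) (hfind.trans hf),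
            ntScanP_cons_none ((o :: os, c) :: L) x t
              (by rw [List.find?_cons_of_neg
                (by simpa [List.isPrefixOf_iff_prefix] using hx)]; exact hf),
            ih t (by omega)]
        | some q =>
          have hqmem := List.mem_of_find?_eq_some hf
          have hq1 : q.1 <+: (x :: t) :=
            List.isPrefixOf_iff_prefix.mp (by simpa using List.find?_some hf)
          have hq0 : q.1 ≠ [] := hne q hqmem
          have hql : 1 ≤ q.1.length := by
            cases hc : q.1 with
            | nil => exact absurd hc hq0
            | cons _ _ => simp
          have hqlen : q.1.length ≤ t.length + 1 := by simpa using hq1.length_le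
          -- no occurrence of (o::os) strictly inside q.1's match window
          have hnoOcc : ∀ p, p < q.1.length - 1 → ¬ (o :: os) <+: t.drop p := by
            intro p hp hocc
            have hdrop := hq1.drop (p + 1)
            have he : (x :: t).drop (p + 1) = t.drop p := by simp
            rw [he] at hdrop
            have hC' := ntCompat_i (o :: os) c q (hC q hqmem) (p + 1) (by omega) (by omega)
            rcases List.prefix_or_prefix_of_prefix hdrop hocc with h' | h'
            · exact hC'.2.1 h'
            · exact hC'.1 h'
          have hsplit := ntRep_split o os c (q.1.length - 1) t hnoOcc
          have hkey : (x :: ntRep o os c t).drop q.1.length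
              = ntRep o os c ((x :: t).drop q.1.length) := by
            have e1 : (x :: ntRep o os c t).drop q.1.length = (ntRep o os c t).drop (q.1.length - 1) := by
              cases hc : q.1.length with
              | zero => omega
              | succ k => simp
            have e2 : (x :: t).drop q.1.length = t.drop (q.1.length - 1) := by
              cases hc : q.1.length with
              | zero => omega
              | succ k => simp
            rw [e1, e2, hsplit,
              List.drop_left' (l₁ := t.take (q.1.length - 1)) (by simp; omega)]
          rw [ntScanP_cons_some L hne x (ntRep o os c t) q (hfind.trans hf), hkey,
            ntScanP_cons_some ((o :: os, c) :: L) hne' x t q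
              (by rw [List.find?_cons_of_neg
                (by simpa [List.isPrefixOf_iff_prefix] using hx)]; exact hf),
            ih ((x :: t).drop q.1.length) (by simp; omega)]

lemma ntStep' (o : Char) (os c : List Char) (L : List (List Char × List Char))
    (hC : ∀ q ∈ L, ntCompatB (o :: os) c q = true) (s : List Char) :
    ntScanP ((o :: os, c) :: L) s = ntScanP L (ntRep o os c s) :=
  (ntStep o os c L hC s.length s le_rfl).symm

-- the full chain: the nine-pass composition equals the single scan over ntTypos
set_option maxHeartbeats 1000000 in
lemma ntMain (s : List Char) :
    ntScanP ntTypos s =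
      ntRep 's' "hutdonw".toList "shutdown".toList
        (ntRep 's' "hutdwon".toList "shutdown".toList
          (ntRep 'r' "unnig".toList "running".toList
            (ntRep 'r' "uning".toList "running".toList
              (ntRep 'h' "osname".toList "hostname".toList
                (ntRep 'i' "nterf".toList "interface".toList
                  (ntRep 'c' "ofig".toList "config".toList
                    (ntRep 'c' "onfi".toList "configure".toList
                      (ntRep 's' "hwo".toList "show".toList s)))))))) := by
  unfold ntTypos
  rw [show ("shwo" : String).toList = 's' :: "hwo".toList from rfl,
    show ("confi" : String).toList = 'c' :: "onfi".toList from rfl,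
    show ("cofig" : String).toList = 'c' :: "ofig".toList from rfl,
    show ("interf" : String).toList = 'i' :: "nterf".toList from rfl,
    show ("hosname" : String).toList = 'h' :: "osname".toList from rfl,
    show ("runing" : String).toList = 'r' :: "uning".toList from rfl,
    show ("runnig" : String).toList = 'r' :: "unnig".toList from rfl,
    show ("shutdwon" : String).toList = 's' :: "hutdwon".toList from rfl,
    show ("shutdonw" : String).toList = 's' :: "hutdonw".toList from rfl]
  rw [ntStep' 's' "hwo".toList "show".toList _ (by decide),
    ntStep' 'c' "onfi".toList "configure".toList _ (by decide),
    ntStep' 'c' "ofig".toList "config".toList _ (by decide),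
    ntStep' 'i' "nterf".toList "interface".toList _ (by decide),
    ntStep' 'h' "osname".toList "hostname".toList _ (by decide),
    ntStep' 'r' "uning".toList "running".toList _ (by decide),
    ntStep' 'r' "unnig".toList "running".toList _ (by decide),
    ntStep' 's' "hutdwon".toList "shutdown".toList _ (by decide),
    ntStep' 's' "hutdonw".toList "shutdown".toList _ (by decide),
    ntScanP_empty]

-- ===== VERDICT (by name: the statement is the Claim_ definition above) =====
set_option maxHeartbeats 1000000 in
theorem normalize_typos_spec : Claim_equal_normalize_typos := by
  intro text _
  show normalize_typos text = normalize_typos_alt text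
  unfold normalize_typos normalize_typos_alt
  simp only [PySem.Str.replace, String.toList_ofList]
  refine congrArg String.ofList ?_
  rw [show ("shwo" : String).toList = 's' :: "hwo".toList from rfl,
    show ("confi" : String).toList = 'c' :: "onfi".toList from rfl,
    show ("cofig" : String).toList = 'c' :: "ofig".toList from rfl,
    show ("interf" : String).toList = 'i' :: "nterf".toList from rfl,
    show ("hosname" : String).toList = 'h' :: "osname".toList from rfl,
    show ("runing" : String).toList = 'r' :: "uning".toList from rfl,
    show ("runnig" : String).toList = 'r' :: "unnig".toList from rfl,
    show ("shutdwon" : String).toList = 's' :: "hutdwon".toList from rfl,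
    show ("shutdonw" : String).toList = 's' :: "hutdonw".toList from rfl]
  rw [ntReplace_eq_rep, ntReplace_eq_rep, ntReplace_eq_rep, ntReplace_eq_rep,
    ntReplace_eq_rep, ntReplace_eq_rep, ntReplace_eq_rep, ntReplace_eq_rep, ntReplace_eq_rep]
  exact (ntMain text.toList).symm
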